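-- pv_equiv track=rewrite | github.com/jeffrelt/RandomGoodness | python/lcsubstr.py | lcsubstrDP
-- ===== SOURCE A (Python) =====
-- def lcsubstrDP(A,B,K):
--     dp = [[0 for _ in range(len(B))] for _ in range(len(B))]
--     for ai,ac in enumerate(A):
--         for bi,bc in enumerate(B):
--             if ac == bc:
--                 dp[ai][bi] = 1 + (0 if bi == 0 or ai == 0 else dp[ai-1][bi-1])
--                 if dp[ai][bi] == K:
--                     return A[ai-dp[ai][bi]+1:ai+1]
--     return ''
-- ===== SOURCE B (Python) =====
-- def lcsubstrDP(A, B, K):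
--     # Earliest K-length substring of A that also occurs in B.
--     if K <= 0 or K > len(A) or K > len(B):
--         return ''
--     windows = {B[j:j+K] for j in range(len(B) - K + 1)}
--     for i in range(len(A) - K + 1):
--         w = A[i:i+K]
--         if w in windows:
--             return w
--     return ''
-- ===== Notes on version B (the rewrite author's own statement) =====
-- stated objective: faster
-- what changed: Replaces the O(|A|*|B|) dynamic-programming table over all character pairs with a set of B's K-length windows built once, then a single scan of A's K-length windows returning the first member of the set.
-- outside the precondition, e.g. on lcsubstrDP('xa', 'a', 5): A raises IndexError, B returns ''; on lcsubstrDP('ab', 'b', 1): A raises IndexError, B returns 'b'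
import Mathlib
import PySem

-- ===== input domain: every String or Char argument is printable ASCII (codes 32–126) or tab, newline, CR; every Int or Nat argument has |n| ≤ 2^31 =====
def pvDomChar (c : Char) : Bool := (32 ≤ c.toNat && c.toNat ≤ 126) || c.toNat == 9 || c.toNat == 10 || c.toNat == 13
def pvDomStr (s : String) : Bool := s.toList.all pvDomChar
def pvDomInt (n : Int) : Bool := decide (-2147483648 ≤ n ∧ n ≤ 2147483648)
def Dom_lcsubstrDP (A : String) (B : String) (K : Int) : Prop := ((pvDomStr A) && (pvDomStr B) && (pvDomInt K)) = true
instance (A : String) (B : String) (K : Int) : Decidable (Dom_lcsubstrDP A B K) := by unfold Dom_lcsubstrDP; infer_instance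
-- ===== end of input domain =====

-- B builds the set of B's K-length windows once and scans A's windows left to right (hash-set membership
-- instead of the DP table); A's IndexError inputs (dp has only len(B) rows) are excluded by Pre_.

-- ===== PORT A =====
-- dp[ai][bi] = v  (none = IndexError when row index ai is out of range, as in Python)
def pvDpSet? (dp : List (List Int)) (ai bi : Nat) (v : Int) : Option (List (List Int)) :=
  match dp[ai]? with
  | none => none
  | some row => if bi < row.length then some (dp.set ai (row.set bi v)) else none

-- inner loop 'for bi,bc in enumerate(B)'; Sum.inl = early return, Sum.inr = fall through with updated dp
def pvInnerA (a : List Char) (K : Int) (ai : Nat) (ac : Char) :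
    List Char → Nat → List (List Int) → Option (Sum String (List (List Int)))
  | [], _, dp => some (Sum.inr dp)
  | bc :: rest, bi, dp =>
    if ac = bc then
      -- RHS first: 0 if bi == 0 or ai == 0 else dp[ai-1][bi-1]  (read may raise IndexError)
      match (if bi = 0 ∨ ai = 0 then some (0 : Int) else dp[ai-1]?.bind (fun row => row[bi-1]?)) with
      | none => none
      | some p =>
        let v := 1 + p
        match pvDpSet? dp ai bi v with
        | none => none
        | some dp' =>
          if v = K then
            some (Sum.inl (String.ofList (PySem.List.slice a (some ((ai : Int) - v + 1)) (some ((ai : Int) + 1)))))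
          else pvInnerA a K ai ac rest (bi+1) dp'
    else pvInnerA a K ai ac rest (bi+1) dp

-- outer loop 'for ai,ac in enumerate(A)'
def pvOuterA (a : List Char) (b : List Char) (K : Int) :
    List Char → Nat → List (List Int) → Option String
  | [], _, _ => some ""
  | ac :: rest, ai, dp =>
    match pvInnerA a K ai ac b 0 dp with
    | none => none
    | some (Sum.inl s) => some s
    | some (Sum.inr dp') => pvOuterA a b K rest (ai+1) dp'

def lcsubstrDP (A : String) (B : String) (K : Int) : String :=
  let a := A.toList
  let b := B.toList
  let dp := (List.range b.length).map (fun _ => (List.range b.length).map (fun _ => (0 : Int)))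
  -- none = IndexError; such inputs are excluded by Pre_ and nothing is claimed there
  (pvOuterA a b K a 0 dp).getD ""

-- ===== PORT B =====
def lcsubstrDP_alt (A : String) (B : String) (K : Int) : String :=
  let a := A.toList
  let b := B.toList
  if K ≤ 0 ∨ (a.length : Int) < K ∨ (b.length : Int) < K then ""
  else
    let windows : PySem.Set (List Char) :=
      PySem.Set.ofList ((PySem.List.pyRange 0 ((b.length : Int) - K + 1) 1).map
        (fun j => PySem.List.slice b (some j) (some (j + K))))
    match (PySem.List.pyRange 0 ((a.length : Int) - K + 1) 1).find?
        (fun i => PySem.Set.contains windows (PySem.List.slice a (some i) (some (i + K)))) with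
    | some i => String.ofList (PySem.List.slice a (some i) (some (i + K)))
    | none => ""

-- ===== PRECONDITION & SPEC =====
-- length-K windows of a ending at index i and of b ending at index j coincide
def pvWinEq (a b : List Char) (k i j : Nat) : Bool :=
  decide (k ≤ i + 1) && decide (k ≤ j + 1) && decide (i < a.length) &&
    ((a.drop (i + 1 - k)).take k == (b.drop (j + 1 - k)).take k)

-- Pre_ excludes exactly the inputs on which A raises IndexError (dp has len(B) rows but is indexed by
-- positions of A): A returns iff either no character of A at an index ≥ len(B) occurs in B, or some
-- K-window match ends inside the first len(B) characters of A (then A returns before reaching a bad row).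
def Pre_lcsubstrDP (A : String) (B : String) (K : Int) : Prop :=
  (∀ i < A.toList.length, B.toList.length ≤ i → A.toList.getD i ' ' ∉ B.toList)
  ∨ (1 ≤ K ∧ ∃ i < B.toList.length, ∃ j < B.toList.length, pvWinEq A.toList B.toList K.toNat i j = true)
instance (A : String) (B : String) (K : Int) : Decidable (Pre_lcsubstrDP A B K) := by
  unfold Pre_lcsubstrDP; infer_instance

def pvWitness_lcsubstrDP : String × String × Int := ("xaby", "zabz", 2)

def Spec_lcsubstrDP (A : String) (B : String) (K : Int) (out : String) : Prop := out = lcsubstrDP_alt A B K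
instance (A : String) (B : String) (K : Int) (out : String) : Decidable (Spec_lcsubstrDP A B K out) := by
  unfold Spec_lcsubstrDP; infer_instance

-- ===== CLAIM (what is proved, stated in full; the proofs are below) =====
def Claim_equal_lcsubstrDP : Prop := ∀ (A : String) (B : String) (K : Int),
  Dom_lcsubstrDP A B K → Pre_lcsubstrDP A B K → Spec_lcsubstrDP A B K (lcsubstrDP A B K)

-- ===== LEMMAS AND PROOFS =====

-- length of the longest common suffix of a[:ai+1] and b[:bi+1] (0 if an index is out of range):
-- the value Python's dp[ai][bi] holds
def pvLcsuf (a b : List Char) : Nat → Nat → Nat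
  | ai, bi =>
    match a[ai]?, b[bi]? with
    | some x, some y =>
      if x = y then
        (if _h : ai = 0 ∨ bi = 0 then 1 else 1 + pvLcsuf a b (ai-1) (bi-1))
      else 0
    | _, _ => 0
  termination_by ai _ => ai
  decreasing_by omega

-- basic facts about pvLcsuf
theorem pvLcsuf_eq (a b : List Char) (ai bi : Nat) :
    pvLcsuf a b ai bi =
      match a[ai]?, b[bi]? with
      | some x, some y =>
        if x = y then (if ai = 0 ∨ bi = 0 then 1 else 1 + pvLcsuf a b (ai-1) (bi-1)) else 0
      | _, _ => 0 := by
  rw [pvLcsuf]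
  simp only [dite_eq_ite]

theorem pvLcsuf_some_some (a b : List Char) (ai bi : Nat) (x y : Char)
    (hx : a[ai]? = some x) (hy : b[bi]? = some y) :
    pvLcsuf a b ai bi =
      if x = y then (if ai = 0 ∨ bi = 0 then 1 else 1 + pvLcsuf a b (ai-1) (bi-1)) else 0 := by
  rw [pvLcsuf_eq, hx, hy]

theorem pvLcsuf_none_left (a b : List Char) (ai bi : Nat) (hx : a[ai]? = none) :
    pvLcsuf a b ai bi = 0 := by
  rw [pvLcsuf_eq, hx]

theorem pvLcsuf_pos_iff (a b : List Char) (ai bi : Nat) :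
    0 < pvLcsuf a b ai bi ↔ ∃ x, a[ai]? = some x ∧ b[bi]? = some x := by
  rcases hx : a[ai]? with _ | x
  · rw [pvLcsuf_none_left a b ai bi hx]
    simp
  rcases hy : b[bi]? with _ | y
  · rw [pvLcsuf_eq, hx, hy]
    simp
  rw [pvLcsuf_some_some a b ai bi x y hx hy]
  by_cases h : x = y
  · subst h
    rw [if_pos rfl]
    constructor
    · intro _; exact ⟨x, rfl, rfl⟩
    · intro _; split <;> omega
  · rw [if_neg h]
    constructor
    · intro h0; omega
    · rintro ⟨z, hz1, hz2⟩
      injection hz1 with e1; injection hz2 with e2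
      exact absurd (e1.trans e2.symm) h

theorem pvLcsuf_match (a b : List Char) (ai bi : Nat) (x : Char)
    (hx : a[ai]? = some x) (hy : b[bi]? = some x) :
    pvLcsuf a b ai bi = 1 + (if ai = 0 ∨ bi = 0 then 0 else pvLcsuf a b (ai-1) (bi-1)) := by
  rw [pvLcsuf_some_some a b ai bi x x hx hy, if_pos rfl]
  split <;> omega

theorem pvLcsuf_nomatch (a b : List Char) (ai bi : Nat)
    (h : ∀ x, a[ai]? = some x → b[bi]? = some x → False) :
    pvLcsuf a b ai bi = 0 := by
  by_contra hne
  obtain ⟨x, hx, hy⟩ := (pvLcsuf_pos_iff a b ai bi).1 (Nat.pos_of_ne_zero hne)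
  exact h x hx hy

theorem pvLcsuf_le (a b : List Char) (ai bi : Nat) :
    pvLcsuf a b ai bi ≤ ai + 1 ∧ pvLcsuf a b ai bi ≤ bi + 1 := by
  induction ai using Nat.strong_induction_on generalizing bi with
  | _ ai ih =>
    rcases hx : a[ai]? with _ | x
    · rw [pvLcsuf_none_left a b ai bi hx]
      exact ⟨Nat.zero_le _, Nat.zero_le _⟩
    rcases hy : b[bi]? with _ | y
    · rw [pvLcsuf_eq, hx, hy]
      exact ⟨Nat.zero_le _, Nat.zero_le _⟩
    rw [pvLcsuf_some_some a b ai bi x y hx hy]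
    by_cases h : x = y
    · rw [if_pos h]
      by_cases h0 : ai = 0 ∨ bi = 0
      · rw [if_pos h0]; omega
      · rw [if_neg h0]
        have := ih (ai - 1) (by omega) (bi - 1)
        omega
    · rw [if_neg h]; omega

theorem pvLcsuf_lt_len (a b : List Char) (ai bi : Nat) (h : 0 < pvLcsuf a b ai bi) :
    ai < a.length ∧ bi < b.length := by
  obtain ⟨x, hx, hy⟩ := (pvLcsuf_pos_iff a b ai bi).1 h
  exact ⟨(List.getElem?_eq_some_iff.1 hx).1, (List.getElem?_eq_some_iff.1 hy).1⟩

-- the window characterisation: a k-window match ending at (ai, bi) is exactly k ≤ pvLcsuf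
theorem pvWin_iff (a b : List Char) (k : Nat) :
    ∀ ai bi, ai < a.length → bi < b.length → k ≤ ai + 1 → k ≤ bi + 1 →
      (((a.drop (ai + 1 - k)).take k = (b.drop (bi + 1 - k)).take k) ↔ k ≤ pvLcsuf a b ai bi) := by
  induction k with
  | zero => intro ai bi _ _ _ _; simp
  | succ k ih =>
    intro ai bi ha hb hka hkb
    have hlena : ((a.drop (ai - k)).take k).length = k := by
      simp; omega
    have hlenb : ((b.drop (bi - k)).take k).length = k := by
      simp; omega
    have hsplit_a : (a.drop (ai + 1 - (k+1))).take (k+1) = (a.drop (ai - k)).take k ++ [a[ai]] := by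
      have h1 : ai + 1 - (k+1) = ai - k := by omega
      rw [h1, List.take_succ]
      congr 1
      have h2 : (a.drop (ai - k))[k]? = a[ai - k + k]? := List.getElem?_drop
      have h3 : ai - k + k = ai := by omega
      rw [h2, h3, List.getElem?_eq_getElem ha]
      rfl
    have hsplit_b : (b.drop (bi + 1 - (k+1))).take (k+1) = (b.drop (bi - k)).take k ++ [b[bi]] := by
      have h1 : bi + 1 - (k+1) = bi - k := by omega
      rw [h1, List.take_succ]
      congr 1
      have h2 : (b.drop (bi - k))[k]? = b[bi - k + k]? := List.getElem?_drop
      have h3 : bi - k + k = bi := by omega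
      rw [h2, h3, List.getElem?_eq_getElem hb]
      rfl
    rw [hsplit_a, hsplit_b]
    have happ : ((a.drop (ai - k)).take k ++ [a[ai]] = (b.drop (bi - k)).take k ++ [b[bi]]) ↔
        ((a.drop (ai - k)).take k = (b.drop (bi - k)).take k ∧ a[ai] = b[bi]) := by
      constructor
      · intro h
        have := List.append_inj h (by rw [hlena, hlenb])
        exact ⟨this.1, by simpa using this.2⟩
      · rintro ⟨h1, h2⟩; rw [h1, h2]
    rw [happ]
    have hxa : a[ai]? = some a[ai] := List.getElem?_eq_getElem ha
    have hxb : b[bi]? = some b[bi] := List.getElem?_eq_getElem hb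
    by_cases hmatch : a[ai] = b[bi]
    · have hlc := pvLcsuf_match a b ai bi a[ai] hxa (by rw [hxb, hmatch])
      by_cases h0 : ai = 0 ∨ bi = 0
      · -- then k = 0 (from k+1 ≤ ai+1 and k+1 ≤ bi+1)
        have hk0 : k = 0 := by omega
        subst hk0
        simp only [hlc, if_pos h0]
        simp [hmatch]
      · have hk1 : pvLcsuf a b ai bi = 1 + pvLcsuf a b (ai-1) (bi-1) := by
          rw [hlc, if_neg h0]
        rcases Nat.eq_zero_or_pos k with hk | hk
        · subst hk
          constructor
          · intro _; omega
          · intro _; exact ⟨by simp, hmatch⟩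
        · have ha' : ai - 1 < a.length := by omega
          have hb' : bi - 1 < b.length := by omega
          have hka' : k ≤ (ai - 1) + 1 := by omega
          have hkb' : k ≤ (bi - 1) + 1 := by omega
          have hiw := ih (ai - 1) (bi - 1) ha' hb' hka' hkb'
          have e1 : (ai - 1) + 1 - k = ai - k := by omega
          have e2 : (bi - 1) + 1 - k = bi - k := by omega
          rw [e1, e2] at hiw
          rw [hiw]
          constructor
          · intro h; omega
          · intro h; exact ⟨by omega, hmatch⟩
    · have hlc : pvLcsuf a b ai bi = 0 := by
        apply pvLcsuf_nomatch
        intro x h1 h2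
        rw [hxa] at h1; rw [hxb] at h2
        exact hmatch (by injection h1 with h1; injection h2 with h2; rw [h1, h2])
      rw [hlc]
      constructor
      · rintro ⟨_, h2⟩; exact absurd h2 hmatch
      · intro h; omega

def pvRowVal (dp : List (List Int)) (r j : Nat) : Int := (dp[r]?.getD [])[j]?.getD 0

def pvHit (a b : List Char) (K : Int) (ai j : Nat) : Prop :=
  0 < pvLcsuf a b ai j ∧ (pvLcsuf a b ai j : Int) = K

theorem pvRowVal_congr (dp dp' : List (List Int)) (r j : Nat) (h : dp'[r]? = dp[r]?) :
    pvRowVal dp' r j = pvRowVal dp r j := by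
  unfold pvRowVal
  rw [h]

-- full characterisation of the inner loop over the remaining suffix of B
theorem pvInnerA_spec (a b : List Char) (K : Int) (ai : Nat) (ac : Char)
    (hac : a[ai]? = some ac) (haim : ai < b.length) :
    ∀ (fuel bi : Nat) (dp : List (List Int)), b.length - bi ≤ fuel →
    dp.length = b.length →
    (∀ row ∈ dp, row.length = b.length) →
    (ai ≠ 0 → ∀ j < b.length, pvRowVal dp (ai-1) j = (pvLcsuf a b (ai-1) j : Int)) →
    (∀ j < b.length, pvRowVal dp ai j = if j < bi then (pvLcsuf a b ai j : Int) else 0) →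
    ( ( (∃ j, bi ≤ j ∧ j < b.length ∧ pvHit a b K ai j) →
        pvInnerA a K ai ac (b.drop bi) bi dp =
          some (Sum.inl (String.ofList (PySem.List.slice a (some ((ai : Int) - K + 1)) (some ((ai : Int) + 1))))) )
    ∧ ( (∀ j, bi ≤ j → j < b.length → ¬ pvHit a b K ai j) →
        ∃ dp', pvInnerA a K ai ac (b.drop bi) bi dp = some (Sum.inr dp') ∧
          dp'.length = b.length ∧ (∀ row ∈ dp', row.length = b.length) ∧
          (∀ r, r ≠ ai → dp'[r]? = dp[r]?) ∧
          (∀ j < b.length, pvRowVal dp' ai j = (pvLcsuf a b ai j : Int)) ) ) := by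
  intro fuel
  induction fuel with
  | zero =>
    intro bi dp hf hlen hrows hprev hcur
    have hbi : b.length ≤ bi := by omega
    rw [List.drop_eq_nil_of_le hbi]
    constructor
    · rintro ⟨j, h1, h2, _⟩; omega
    · intro _
      refine ⟨dp, rfl, hlen, hrows, fun r _ => rfl, ?_⟩
      intro j hj
      rw [hcur j hj, if_pos (by omega)]
  | succ fuel ih =>
    intro bi dp hf hlen hrows hprev hcur
    by_cases hbi : b.length ≤ bi
    · exact ih bi dp (by omega) hlen hrows hprev hcur
    push_neg at hbi
    have hdrop : b.drop bi = b[bi] :: b.drop (bi+1) := List.drop_eq_getElem_cons hbi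
    rw [hdrop]
    by_cases hmatch : ac = b[bi]
    · -- character match: Python writes dp[ai][bi] and may return
      have hbc : b[bi]? = some ac := by
        rw [List.getElem?_eq_getElem hbi, hmatch]
      -- the value p that Python reads on the right-hand side
      have hread : (if bi = 0 ∨ ai = 0 then some (0:Int)
            else dp[ai-1]?.bind (fun row => row[bi-1]?)) =
          some (if bi = 0 ∨ ai = 0 then (0:Int) else (pvLcsuf a b (ai-1) (bi-1) : Int)) := by
        by_cases h0 : bi = 0 ∨ ai = 0
        · rw [if_pos h0, if_pos h0]
        · rw [if_neg h0, if_neg h0]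
          push_neg at h0
          have hai1 : ai - 1 < dp.length := by omega
          rw [List.getElem?_eq_getElem hai1]
          have hrl : dp[ai-1].length = b.length := hrows _ (List.getElem_mem hai1)
          have hbi1 : bi - 1 < dp[ai-1].length := by omega
          rw [Option.bind_some, List.getElem?_eq_getElem hbi1]
          have hpv := hprev h0.2 (bi-1) (by omega)
          unfold pvRowVal at hpv
          rw [List.getElem?_eq_getElem hai1] at hpv
          simp only [Option.getD_some] at hpv
          rw [List.getElem?_eq_getElem hbi1] at hpv
          simp only [Option.getD_some] at hpv
          rw [hpv]
      have hlc : pvLcsuf a b ai bi =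
          1 + (if ai = 0 ∨ bi = 0 then 0 else pvLcsuf a b (ai-1) (bi-1)) :=
        pvLcsuf_match a b ai bi ac hac hbc
      have hv : (1 : Int) + (if bi = 0 ∨ ai = 0 then (0:Int) else (pvLcsuf a b (ai-1) (bi-1) : Int)) =
          (pvLcsuf a b ai bi : Int) := by
        rw [hlc]
        by_cases h0 : ai = 0 ∨ bi = 0
        · rw [if_pos h0, if_pos (Or.symm h0)]; simp
        · rw [if_neg h0, if_neg (fun h => h0 (Or.symm h))]
          push_cast
          ring
      -- the write dp[ai][bi] = v succeeds
      have haidp : ai < dp.length := by omega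
      have hrowlen : dp[ai].length = b.length := hrows _ (List.getElem_mem haidp)
      have hset : ∀ v : Int, pvDpSet? dp ai bi v = some (dp.set ai (dp[ai].set bi v)) := by
        intro v
        have hblt : bi < dp[ai].length := by omega
        simp [pvDpSet?, List.getElem?_eq_getElem haidp, hblt]
      -- one unfolding step of the loop
      have hstep : pvInnerA a K ai ac (b[bi] :: b.drop (bi+1)) bi dp =
          (if (pvLcsuf a b ai bi : Int) = K then
            some (Sum.inl (String.ofList (PySem.List.slice a
              (some ((ai : Int) - (pvLcsuf a b ai bi : Int) + 1)) (some ((ai : Int) + 1)))))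
          else pvInnerA a K ai ac (b.drop (bi+1)) (bi+1) (dp.set ai (dp[ai].set bi ((pvLcsuf a b ai bi : Int))))) := by
        rw [pvInnerA]
        rw [if_pos hmatch, hread]
        simp only [hset, hv]
      rw [hstep]
      have hpos : 0 < pvLcsuf a b ai bi := by
        rw [hlc]; omega
      by_cases hvK : (pvLcsuf a b ai bi : Int) = K
      · rw [if_pos hvK]
        constructor
        · intro _
          rw [hvK]
        · intro hno
          exact absurd ⟨hpos, hvK⟩ (hno bi le_rfl hbi)
      · rw [if_neg hvK]
        -- invariants for the updated table
        set dp' := dp.set ai (dp[ai].set bi ((pvLcsuf a b ai bi : Int))) with hdp'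
        have hlen' : dp'.length = b.length := by rw [hdp', List.length_set, hlen]
        have hrows' : ∀ row ∈ dp', row.length = b.length := by
          intro row hrow
          rcases List.mem_or_eq_of_mem_set hrow with h | h
          · exact hrows row h
          · rw [h, List.length_set]; exact hrowlen
        have hoff : ∀ r, r ≠ ai → dp'[r]? = dp[r]? := by
          intro r hr
          rw [hdp', List.getElem?_set_ne (fun h => hr h.symm)]
        have hprev' : ai ≠ 0 → ∀ j < b.length, pvRowVal dp' (ai-1) j = (pvLcsuf a b (ai-1) j : Int) := by
          intro h0 j hj
          rw [pvRowVal_congr dp dp' (ai-1) j (hoff (ai-1) (by omega))]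
          exact hprev h0 j hj
        have hcur' : ∀ j < b.length, pvRowVal dp' ai j = if j < bi + 1 then (pvLcsuf a b ai j : Int) else 0 := by
          intro j hj
          have hget' : dp'[ai]? = some (dp[ai].set bi ((pvLcsuf a b ai bi : Int))) := by
            rw [hdp']
            exact List.getElem?_set_self (by omega)
          unfold pvRowVal
          rw [hget']
          simp only [Option.getD_some]
          by_cases hjbi : j = bi
          · subst hjbi
            rw [List.getElem?_set_self (by omega)]
            simp only [Option.getD_some]
            rw [if_pos (by omega)]
          · rw [List.getElem?_set_ne (fun h => hjbi h.symm)]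
            have hc := hcur j hj
            unfold pvRowVal at hc
            rw [List.getElem?_eq_getElem haidp] at hc
            simp only [Option.getD_some] at hc
            rw [hc]
            by_cases hjb : j < bi
            · rw [if_pos hjb, if_pos (by omega)]
            · rw [if_neg hjb, if_neg (by omega)]
        have IH := ih (bi+1) dp' (by omega) hlen' hrows' hprev' hcur'
        constructor
        · rintro ⟨j, hj1, hj2, hj3⟩
          have hjne : j ≠ bi := by
            intro h; subst h; exact hvK hj3.2
          exact IH.1 ⟨j, by omega, hj2, hj3⟩
        · intro hno
          obtain ⟨dp'', e, l1, l2, l3, l4⟩ := IH.2 (fun j hj1 hj2 => hno j (by omega) hj2)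
          refine ⟨dp'', e, l1, l2, ?_, l4⟩
          intro r hr
          rw [l3 r hr, hoff r hr]
    · -- no character match: dp is untouched, pvLcsuf a b ai bi = 0
      have hlc0 : pvLcsuf a b ai bi = 0 := by
        apply pvLcsuf_nomatch
        intro x h1 h2
        rw [hac] at h1
        rw [List.getElem?_eq_getElem hbi] at h2
        injection h1 with e1; injection h2 with e2
        exact hmatch (by rw [e1, ← e2])
      have hstep : pvInnerA a K ai ac (b[bi] :: b.drop (bi+1)) bi dp =
          pvInnerA a K ai ac (b.drop (bi+1)) (bi+1) dp := by
        rw [pvInnerA, if_neg hmatch]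
      rw [hstep]
      have hcur' : ∀ j < b.length, pvRowVal dp ai j = if j < bi + 1 then (pvLcsuf a b ai j : Int) else 0 := by
        intro j hj
        rw [hcur j hj]
        by_cases hjb : j < bi
        · rw [if_pos hjb, if_pos (by omega)]
        · by_cases hjbi : j = bi
          · subst hjbi
            rw [if_neg hjb, if_pos (by omega), hlc0]
            simp
          · rw [if_neg hjb, if_neg (by omega)]
      have IH := ih (bi+1) dp (by omega) hlen hrows hprev hcur'
      constructor
      · rintro ⟨j, hj1, hj2, hj3⟩
        have hjne : j ≠ bi := by
          intro h; subst h
          obtain ⟨hp, _⟩ := hj3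
          rw [hlc0] at hp
          exact absurd hp (by omega)
        exact IH.1 ⟨j, by omega, hj2, hj3⟩
      · intro hno
        exact IH.2 (fun j hj1 hj2 => hno j (by omega) hj2)

theorem pvInnerA_skip (a : List Char) (K : Int) (ai : Nat) (ac : Char) :
    ∀ (bs : List Char) (bi : Nat) (dp : List (List Int)), (∀ c ∈ bs, ac ≠ c) →
    pvInnerA a K ai ac bs bi dp = some (Sum.inr dp) := by
  intro bs
  induction bs with
  | nil => intro bi dp _; rw [pvInnerA]
  | cons bc rest ih =>
    intro bi dp h
    rw [pvInnerA, if_neg (h bc (by simp))]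
    exact ih (bi+1) dp (fun c hc => h c (by simp [hc]))

theorem pvOuterA_found_base (a b : List Char) (K : Int) (ai0 : Nat)
    (h0a : ai0 < a.length) (h0m : ai0 < b.length)
    (hhit : ∃ j, j < b.length ∧ pvHit a b K ai0 j)
    (dp : List (List Int))
    (hlen : dp.length = b.length) (hrows : ∀ row ∈ dp, row.length = b.length)
    (hprev : ai0 ≠ 0 → ∀ j < b.length, pvRowVal dp (ai0-1) j = (pvLcsuf a b (ai0-1) j : Int))
    (hzero : ∀ j < b.length, pvRowVal dp ai0 j = 0) :
    pvOuterA a b K (a.drop ai0) ai0 dp =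
      some (String.ofList (PySem.List.slice a (some ((ai0 : Int) - K + 1)) (some ((ai0 : Int) + 1)))) := by
  have hdrop : a.drop ai0 = a[ai0] :: a.drop (ai0+1) := List.drop_eq_getElem_cons h0a
  rw [hdrop, pvOuterA]
  have hcur0 : ∀ j < b.length, pvRowVal dp ai0 j = if j < 0 then (pvLcsuf a b ai0 j : Int) else 0 := by
    intro j hj
    rw [if_neg (by omega)]
    exact hzero j hj
  have hspec := pvInnerA_spec a b K ai0 a[ai0] (List.getElem?_eq_getElem h0a) h0m
    b.length 0 dp (by omega) hlen hrows hprev hcur0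
  simp only [List.drop_zero] at hspec
  obtain ⟨j, hj1, hj2⟩ := hhit
  rw [hspec.1 ⟨j, by omega, hj1, hj2⟩]

theorem pvOuterA_found (a b : List Char) (K : Int) (ai0 : Nat)
    (h0a : ai0 < a.length) (h0m : ai0 < b.length)
    (hhit : ∃ j, j < b.length ∧ pvHit a b K ai0 j) :
    ∀ (n s : Nat) (dp : List (List Int)), ai0 - s ≤ n → s ≤ ai0 →
    (∀ ai, s ≤ ai → ai < ai0 → ∀ j, j < b.length → ¬ pvHit a b K ai j) →
    dp.length = b.length → (∀ row ∈ dp, row.length = b.length) →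
    (s ≠ 0 → ∀ j < b.length, pvRowVal dp (s-1) j = (pvLcsuf a b (s-1) j : Int)) →
    (∀ r, s ≤ r → ∀ j < b.length, pvRowVal dp r j = 0) →
    pvOuterA a b K (a.drop s) s dp =
      some (String.ofList (PySem.List.slice a (some ((ai0 : Int) - K + 1)) (some ((ai0 : Int) + 1)))) := by
  intro n
  induction n with
  | zero =>
    intro s dp hn hs hmin hlen hrows hprev hzero
    have hsai : s = ai0 := by omega
    subst hsai
    exact pvOuterA_found_base a b K s h0a h0m hhit dp hlen hrows hprev (hzero s le_rfl)
  | succ n ih =>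
    intro s dp hn hs hmin hlen hrows hprev hzero
    by_cases hse : s = ai0
    · subst hse
      exact pvOuterA_found_base a b K s h0a h0m hhit dp hlen hrows hprev (hzero s le_rfl)
    · have hslt : s < ai0 := by omega
      have hsa : s < a.length := by omega
      have hsm : s < b.length := by omega
      have hdrop : a.drop s = a[s] :: a.drop (s+1) := List.drop_eq_getElem_cons hsa
      rw [hdrop, pvOuterA]
      have hcur0 : ∀ j < b.length, pvRowVal dp s j = if j < 0 then (pvLcsuf a b s j : Int) else 0 := by
        intro j hj
        rw [if_neg (by omega)]
        exact hzero s le_rfl j hj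
      have hspec := pvInnerA_spec a b K s a[s] (List.getElem?_eq_getElem hsa) hsm
        b.length 0 dp (by omega) hlen hrows hprev hcur0
      simp only [List.drop_zero] at hspec
      obtain ⟨dp', e, l1, l2, l3, l4⟩ := hspec.2 (fun j _ hj => hmin s le_rfl hslt j hj)
      rw [e]
      exact ih (s+1) dp' (by omega) (by omega) (fun ai h1 h2 => hmin ai (by omega) h2) l1 l2
        (fun _ j hj => l4 j hj)
        (fun r hr j hj => by
          rw [pvRowVal_congr dp dp' r j (l3 r (by omega))]
          exact hzero r (by omega) j hj)

theorem pvOuterA_none (a b : List Char) (K : Int) :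
    ∀ (n s : Nat) (dp : List (List Int)), a.length - s ≤ n →
    (∀ ai, s ≤ ai → ai < a.length → ai < b.length → ∀ j, j < b.length → ¬ pvHit a b K ai j) →
    (∀ ai, s ≤ ai → (h2 : ai < a.length) → b.length ≤ ai → a[ai] ∉ b) →
    dp.length = b.length → (∀ row ∈ dp, row.length = b.length) →
    (s ≠ 0 → ∀ j < b.length, pvRowVal dp (s-1) j = (pvLcsuf a b (s-1) j : Int)) →
    (∀ r, s ≤ r → ∀ j < b.length, pvRowVal dp r j = 0) →
    pvOuterA a b K (a.drop s) s dp = some "" := by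
  intro n
  induction n with
  | zero =>
    intro s dp hn _ _ _ _ _ _
    have hs : a.length ≤ s := by omega
    rw [List.drop_eq_nil_of_le hs, pvOuterA]
  | succ n ih =>
    intro s dp hn hnohit hchar hlen hrows hprev hzero
    by_cases hsa : a.length ≤ s
    · rw [List.drop_eq_nil_of_le hsa, pvOuterA]
    · push_neg at hsa
      have hdrop : a.drop s = a[s] :: a.drop (s+1) := List.drop_eq_getElem_cons hsa
      rw [hdrop, pvOuterA]
      by_cases hsm : s < b.length
      · -- a row inside the table: processed without a hit
        have hcur0 : ∀ j < b.length, pvRowVal dp s j = if j < 0 then (pvLcsuf a b s j : Int) else 0 := by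
          intro j hj
          rw [if_neg (by omega)]
          exact hzero s le_rfl j hj
        have hspec := pvInnerA_spec a b K s a[s] (List.getElem?_eq_getElem hsa) hsm
          b.length 0 dp (by omega) hlen hrows hprev hcur0
        simp only [List.drop_zero] at hspec
        obtain ⟨dp', e, l1, l2, l3, l4⟩ := hspec.2 (fun j _ hj => hnohit s le_rfl hsa hsm j hj)
        rw [e]
        exact ih (s+1) dp' (by omega) (fun ai h1 => hnohit ai (by omega))
          (fun ai h1 => hchar ai (by omega)) l1 l2
          (fun _ j hj => l4 j hj)
          (fun r hr j hj => by
            rw [pvRowVal_congr dp dp' r j (l3 r (by omega))]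
            exact hzero r (by omega) j hj)
      · -- a row past the table: no character of A here occurs in B, nothing happens
        push_neg at hsm
        have hnotin : a[s] ∉ b := hchar s le_rfl hsa hsm
        rw [pvInnerA_skip a K s a[s] b 0 dp (fun c hc he => hnotin (he ▸ hc))]
        refine ih (s+1) dp (by omega) (fun ai h1 => hnohit ai (by omega))
          (fun ai h1 => hchar ai (by omega)) hlen hrows ?_
          (fun r hr j hj => hzero r (by omega) j hj)
        intro _ j hj
        have e0 : pvRowVal dp ((s+1)-1) j = 0 := hzero s le_rfl j hj
        have elc : pvLcsuf a b ((s+1)-1) j = 0 := by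
          apply pvLcsuf_nomatch
          intro x h1 h2
          simp only [Nat.add_sub_cancel] at h1
          rw [List.getElem?_eq_getElem hsa] at h1
          injection h1 with e1
          apply hnotin
          rw [e1]
          exact List.mem_of_getElem? h2
        rw [e0, elc]
        simp

theorem pvLcsuf_step (a b : List Char) (ai bi : Nat) (h2 : 2 ≤ pvLcsuf a b ai bi) :
    ai ≠ 0 ∧ bi ≠ 0 ∧ pvLcsuf a b ai bi = 1 + pvLcsuf a b (ai-1) (bi-1) := by
  obtain ⟨x, hx, hy⟩ := (pvLcsuf_pos_iff a b ai bi).1 (by omega)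
  have hlc := pvLcsuf_match a b ai bi x hx hy
  by_cases h0 : ai = 0 ∨ bi = 0
  · rw [if_pos h0] at hlc; omega
  · rw [if_neg h0] at hlc
    exact ⟨fun h => h0 (Or.inl h), fun h => h0 (Or.inr h), hlc⟩

theorem pvWinEq_iff (a b : List Char) (k i j : Nat) :
    pvWinEq a b k i j = true ↔
      (k ≤ i+1 ∧ k ≤ j+1 ∧ i < a.length ∧ (a.drop (i+1-k)).take k = (b.drop (j+1-k)).take k) := by
  simp [pvWinEq]
  tauto

theorem pvDef_A (A B : String) (K : Int) :
    lcsubstrDP A B K = (pvOuterA A.toList B.toList K A.toList 0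
      ((List.range B.toList.length).map (fun _ => (List.range B.toList.length).map (fun _ => (0:Int))))).getD "" := rfl

theorem pvDp0_len (m : Nat) :
    ((List.range m).map (fun _ => (List.range m).map (fun _ => (0:Int)))).length = m := by simp

theorem pvDp0_rows (m : Nat) :
    ∀ row ∈ (List.range m).map (fun _ => (List.range m).map (fun _ => (0:Int))), row.length = m := by
  intro row hrow
  obtain ⟨x, _, he⟩ := List.mem_map.1 hrow
  rw [← he]; simp

theorem pvDp0_rowVal (m r j : Nat) :
    pvRowVal ((List.range m).map (fun _ => (List.range m).map (fun _ => (0:Int)))) r j = 0 := by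
  unfold pvRowVal
  rcases h : ((List.range m).map (fun _ => (List.range m).map (fun _ => (0:Int))))[r]? with _ | row
  · simp
  · simp only [Option.getD_some]
    have hrow := List.mem_of_getElem? h
    obtain ⟨x, _, he⟩ := List.mem_map.1 hrow
    rcases h2 : row[j]? with _ | v
    · simp
    · have hv := List.mem_of_getElem? h2
      rw [← he] at hv
      obtain ⟨y, _, hev⟩ := List.mem_map.1 hv
      simp [← hev]

theorem pvFind_pyRange_some (p : Int → Bool) (n i0 : Int) (hp : p i0 = true) (h1 : i0 < n)
    (hlt : ∀ i : Int, 0 ≤ i → i < i0 → p i = false) :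
    ∀ (fuel : Nat) (s : Int), 0 ≤ s → s ≤ i0 → (i0 - s).toNat ≤ fuel →
      (PySem.List.pyRange s n 1).find? p = some i0 := by
  intro fuel
  induction fuel with
  | zero =>
    intro s hs0 hsi hf
    have he : s = i0 := by omega
    subst he
    rw [PySem.List.pyRange_one_cons (by omega)]
    simp [List.find?_cons, hp]
  | succ fuel ih =>
    intro s hs0 hsi hf
    rcases eq_or_lt_of_le hsi with he | hlt2
    · subst he
      rw [PySem.List.pyRange_one_cons (by omega)]
      simp [List.find?_cons, hp]
    · rw [PySem.List.pyRange_one_cons (by omega)]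
      rw [List.find?_cons, hlt s hs0 hlt2]
      exact ih (s+1) (by omega) (by omega) (by omega)

theorem pvFind_pyRange_none (p : Int → Bool) (n : Int)
    (h : ∀ i : Int, 0 ≤ i → i < n → p i = false) :
    (PySem.List.pyRange 0 n 1).find? p = none := by
  rw [List.find?_eq_none]
  intro x hx
  have := (PySem.List.mem_pyRange_one).1 hx
  rw [h x this.1 this.2]
  simp

theorem pvDef_Alt (A B : String) (K : Int) :
    lcsubstrDP_alt A B K =
      (if K ≤ 0 ∨ (A.toList.length : Int) < K ∨ (B.toList.length : Int) < K then ""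
       else
        match (PySem.List.pyRange 0 ((A.toList.length : Int) - K + 1) 1).find?
            (fun i => PySem.Set.contains
              (PySem.Set.ofList ((PySem.List.pyRange 0 ((B.toList.length : Int) - K + 1) 1).map
                (fun j => PySem.List.slice B.toList (some j) (some (j + K)))))
              (PySem.List.slice A.toList (some i) (some (i + K)))) with
        | some i => String.ofList (PySem.List.slice A.toList (some i) (some (i + K)))
        | none => "") := rfl

theorem pvMainList (a b : List Char) (K : Int)
    (hpre : (∀ i < a.length, b.length ≤ i → a.getD i ' ' ∉ b)
      ∨ (1 ≤ K ∧ ∃ i < b.length, ∃ j < b.length, pvWinEq a b K.toNat i j = true)) :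
    (pvOuterA a b K a 0
        ((List.range b.length).map (fun _ => (List.range b.length).map (fun _ => (0:Int))))).getD ""
    = (if K ≤ 0 ∨ (a.length : Int) < K ∨ (b.length : Int) < K then ""
       else
        match (PySem.List.pyRange 0 ((a.length : Int) - K + 1) 1).find?
            (fun i => PySem.Set.contains
              (PySem.Set.ofList ((PySem.List.pyRange 0 ((b.length : Int) - K + 1) 1).map
                (fun j => PySem.List.slice b (some j) (some (j + K)))))
              (PySem.List.slice a (some i) (some (i + K)))) with
        | some i => String.ofList (PySem.List.slice a (some i) (some (i + K)))
        | none => "") := by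
  have hwj : ∀ (w : List Char), PySem.Set.contains
      (PySem.Set.ofList ((PySem.List.pyRange 0 ((b.length : Int) - K + 1) 1).map
        (fun j => PySem.List.slice b (some j) (some (j + K))))) w = true ↔
      ∃ jj : Int, 0 ≤ jj ∧ jj < (b.length : Int) - K + 1 ∧
        PySem.List.slice b (some jj) (some (jj + K)) = w := by
    intro w
    rw [PySem.Set.contains_iff, PySem.Set.mem_ofList, List.mem_map]
    constructor
    · rintro ⟨jj, hjj, he⟩
      have hb := PySem.List.mem_pyRange_one.1 hjj
      exact ⟨jj, hb.1, hb.2, he⟩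
    · rintro ⟨jj, h1, h2, he⟩
      exact ⟨jj, PySem.List.mem_pyRange_one.2 ⟨h1, h2⟩, he⟩
  by_cases hd2 : 1 ≤ K ∧ ∃ i < b.length, ∃ j < b.length, pvWinEq a b K.toNat i j = true
  · obtain ⟨hK1, i, him, j0, hj0m, hw⟩ := hd2
    have hKk : (K.toNat : Int) = K := Int.toNat_of_nonneg (by omega)
    set k := K.toNat with hkdef
    have hk1 : 1 ≤ k := by omega
    obtain ⟨hki, hkj, hia, htake⟩ := (pvWinEq_iff a b k i j0).1 hw
    have hlc0 : k ≤ pvLcsuf a b i j0 := (pvWin_iff a b k i j0 hia hj0m hki hkj).1 htake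
    haveI : DecidablePred (fun ai => ∃ j, j < b.length ∧ k ≤ pvLcsuf a b ai j) :=
      Classical.decPred _
    have hex : ∃ ai, ∃ j, j < b.length ∧ k ≤ pvLcsuf a b ai j := ⟨i, j0, hj0m, hlc0⟩
    obtain ⟨je, hjem, hjelc⟩ := Nat.find_spec hex
    have hminP : ∀ m, m < Nat.find hex → ¬ ∃ j, j < b.length ∧ k ≤ pvLcsuf a b m j :=
      fun m hm => Nat.find_min hex hm
    set ai0 := Nat.find hex with hai0def
    have hai0i : ai0 ≤ i := Nat.find_min' hex ⟨j0, hj0m, hlc0⟩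
    have hai0m : ai0 < b.length := by omega
    have hai0a : ai0 < a.length := (pvLcsuf_lt_len a b ai0 je (by omega)).1
    have hexact : ∀ j, j < b.length → k ≤ pvLcsuf a b ai0 j → pvLcsuf a b ai0 j = k := by
      intro j hj hkle
      by_contra hne
      obtain ⟨hane, hbne, hstep⟩ := pvLcsuf_step a b ai0 j (by omega)
      exact hminP (ai0 - 1) (by omega) ⟨j - 1, by omega, by omega⟩
    have hhit : ∃ j, j < b.length ∧ pvHit a b K ai0 j := by
      refine ⟨je, hjem, ⟨by omega, ?_⟩⟩
      rw [hexact je hjem hjelc, hKk]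
    have hnohit : ∀ ai, ai < ai0 → ∀ j, j < b.length → ¬ pvHit a b K ai j := by
      rintro ai hai j hj ⟨hpos, hKe⟩
      have hlck : pvLcsuf a b ai j = k := by
        have := hKe.trans hKk.symm
        exact_mod_cast this
      exact hminP ai hai ⟨j, hj, le_of_eq hlck.symm⟩
    have hA := pvOuterA_found a b K ai0 hai0a hai0m hhit ai0 0
      ((List.range b.length).map (fun _ => (List.range b.length).map (fun _ => (0:Int))))
      (by omega) (by omega) (fun ai h1 h2 j hj => hnohit ai h2 j hj)
      (pvDp0_len b.length) (pvDp0_rows b.length)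
      (fun h => absurd rfl h)
      (fun r _ j _ => pvDp0_rowVal b.length r j)
    rw [List.drop_zero] at hA
    have hleai := pvLcsuf_le a b ai0 je
    have hkai0 : k ≤ ai0 + 1 := by omega
    have hkje : k ≤ je + 1 := by omega
    set i0 : Nat := ai0 + 1 - k with hi0
    have hsliceA : PySem.List.slice a (some ((ai0 : Int) - K + 1)) (some ((ai0 : Int) + 1))
        = (a.drop i0).take k := by
      have e1 : ((ai0 : Int) - K + 1) = ((i0 : Nat) : Int) := by omega
      have e2 : ((ai0 : Int) + 1) = ((i0 : Nat) : Int) + ((k : Nat) : Int) := by omega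
      rw [e1, e2, PySem.List.slice_natCast_add]
    have hguard : ¬(K ≤ 0 ∨ (a.length : Int) < K ∨ (b.length : Int) < K) := by omega
    rw [hA, Option.getD_some, if_neg hguard]
    have hwineq := (pvWin_iff a b k ai0 je hai0a hjem hkai0 hkje).2 hjelc
    have hp0 : PySem.Set.contains
        (PySem.Set.ofList ((PySem.List.pyRange 0 ((b.length : Int) - K + 1) 1).map
          (fun j => PySem.List.slice b (some j) (some (j + K)))))
        (PySem.List.slice a (some ((i0 : Nat) : Int)) (some (((i0 : Nat) : Int) + K))) = true := by
      apply (hwj _).2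
      refine ⟨((je + 1 - k : Nat) : Int), by omega, by omega, ?_⟩
      have eb : PySem.List.slice b (some ((je + 1 - k : Nat) : Int))
          (some (((je + 1 - k : Nat) : Int) + K)) = (b.drop (je + 1 - k)).take k := by
        rw [← hKk, PySem.List.slice_natCast_add]
      have ea : PySem.List.slice a (some ((i0 : Nat) : Int))
          (some (((i0 : Nat) : Int) + K)) = (a.drop i0).take k := by
        rw [← hKk, PySem.List.slice_natCast_add]
      rw [eb, ea, hi0]
      exact hwineq.symm
    have hplt : ∀ ii : Int, 0 ≤ ii → ii < ((i0 : Nat) : Int) →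
        PySem.Set.contains
          (PySem.Set.ofList ((PySem.List.pyRange 0 ((b.length : Int) - K + 1) 1).map
            (fun j => PySem.List.slice b (some j) (some (j + K)))))
          (PySem.List.slice a (some ii) (some (ii + K))) = false := by
      intro ii h0 hlt
      by_contra hcontra
      simp only [Bool.not_eq_false] at hcontra
      obtain ⟨jj, hj1, hj2, he⟩ := (hwj _).1 hcontra
      have hii : ii = ((ii.toNat : Nat) : Int) := (Int.toNat_of_nonneg h0).symm
      have hjj : jj = ((jj.toNat : Nat) : Int) := (Int.toNat_of_nonneg hj1).symm
      rw [hii, ← hKk, PySem.List.slice_natCast_add] at he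
      rw [hjj, PySem.List.slice_natCast_add] at he
      set ni := ii.toNat
      set nj := jj.toNat
      have hni0 : ni < i0 := by omega
      have hnjm : nj + k ≤ b.length := by omega
      have hain : ni + k - 1 < a.length := by omega
      have hwiniff := pvWin_iff a b k (ni + k - 1) (nj + k - 1) hain (by omega) (by omega) (by omega)
      rw [show ni + k - 1 + 1 - k = ni from by omega, show nj + k - 1 + 1 - k = nj from by omega] at hwiniff
      have hlcw := hwiniff.1 he.symm
      exact hminP (ni + k - 1) (by omega) ⟨nj + k - 1, by omega, hlcw⟩
    have hfind := pvFind_pyRange_some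
      (fun i => PySem.Set.contains
        (PySem.Set.ofList ((PySem.List.pyRange 0 ((b.length : Int) - K + 1) 1).map
          (fun j => PySem.List.slice b (some j) (some (j + K)))))
        (PySem.List.slice a (some i) (some (i + K))))
      ((a.length : Int) - K + 1) ((i0 : Nat) : Int)
      hp0 (by omega) hplt i0 0 le_rfl (by omega) (by omega)
    rw [hfind]
    have ea : PySem.List.slice a (some ((i0 : Nat) : Int))
        (some (((i0 : Nat) : Int) + K)) = (a.drop i0).take k := by
      rw [← hKk, PySem.List.slice_natCast_add]
    rw [hsliceA]
    exact congrArg String.ofList ea.symm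
  · have hd1 := hpre.resolve_right hd2
    have hnohit : ∀ ai, 0 ≤ ai → ai < a.length → ai < b.length →
        ∀ j, j < b.length → ¬ pvHit a b K ai j := by
      rintro ai _ haia haim j hj ⟨hpos, hKe⟩
      have hK1 : (1 : Int) ≤ K := by
        rw [← hKe]
        exact_mod_cast hpos
      have hKk : (K.toNat : Int) = K := Int.toNat_of_nonneg (by omega)
      have hlck : pvLcsuf a b ai j = K.toNat := by
        have := hKe.trans hKk.symm
        exact_mod_cast this
      have hle := pvLcsuf_le a b ai j
      have hwin := (pvWin_iff a b K.toNat ai j haia hj (by omega) (by omega)).2 (by omega)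
      exact hd2 ⟨hK1, ai, haim, j, hj,
        (pvWinEq_iff a b K.toNat ai j).2 ⟨by omega, by omega, haia, hwin⟩⟩
    have hchar : ∀ ai, 0 ≤ ai → (h2 : ai < a.length) → b.length ≤ ai → a[ai] ∉ b := by
      intro ai _ h2 hm
      have := hd1 ai h2 hm
      rwa [List.getD_eq_getElem a ' ' h2] at this
    have hA := pvOuterA_none a b K a.length 0
      ((List.range b.length).map (fun _ => (List.range b.length).map (fun _ => (0:Int))))
      (by omega) (fun ai _ h1 h2 j hj => hnohit ai (by omega) h1 h2 j hj)
      (fun ai _ h2 hm => hchar ai (by omega) h2 hm)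
      (pvDp0_len b.length) (pvDp0_rows b.length)
      (fun h => absurd rfl h)
      (fun r _ j _ => pvDp0_rowVal b.length r j)
    rw [List.drop_zero] at hA
    rw [hA, Option.getD_some]
    by_cases hg : K ≤ 0 ∨ (a.length : Int) < K ∨ (b.length : Int) < K
    · rw [if_pos hg]
    · rw [if_neg hg]
      have hK1 : (1 : Int) ≤ K := by omega
      have hKk : (K.toNat : Int) = K := Int.toNat_of_nonneg (by omega)
      set k := K.toNat with hkdef
      have hk1 : 1 ≤ k := by omega
      have hnone := pvFind_pyRange_none
        (fun i => PySem.Set.contains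
          (PySem.Set.ofList ((PySem.List.pyRange 0 ((b.length : Int) - K + 1) 1).map
            (fun j => PySem.List.slice b (some j) (some (j + K)))))
          (PySem.List.slice a (some i) (some (i + K))))
        ((a.length : Int) - K + 1) ?hfalse
      case hfalse =>
        intro ii h0 hlt
        by_contra hcontra
        simp only [Bool.not_eq_false] at hcontra
        obtain ⟨jj, hj1, hj2, he⟩ := (hwj _).1 hcontra
        have hii : ii = ((ii.toNat : Nat) : Int) := (Int.toNat_of_nonneg h0).symm
        have hjj : jj = ((jj.toNat : Nat) : Int) := (Int.toNat_of_nonneg hj1).symm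
        rw [hii, ← hKk, PySem.List.slice_natCast_add] at he
        rw [hjj, PySem.List.slice_natCast_add] at he
        set ni := ii.toNat
        set nj := jj.toNat
        have hnik : ni + k ≤ a.length := by omega
        have hnjm : nj + k ≤ b.length := by omega
        have hain : ni + k - 1 < a.length := by omega
        have hwiniff := pvWin_iff a b k (ni + k - 1) (nj + k - 1) hain (by omega) (by omega) (by omega)
        rw [show ni + k - 1 + 1 - k = ni from by omega, show nj + k - 1 + 1 - k = nj from by omega] at hwiniff
        have hlcw := hwiniff.1 he.symm
        by_cases haim : ni + k - 1 < b.length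
        · apply hd2
          refine ⟨hK1, ni + k - 1, haim, nj + k - 1, by omega,
            (pvWinEq_iff a b k (ni + k - 1) (nj + k - 1)).2 ⟨by omega, by omega, hain, ?_⟩⟩
          rw [show ni + k - 1 + 1 - k = ni from by omega, show nj + k - 1 + 1 - k = nj from by omega]
          exact he.symm
        · obtain ⟨x, hx, hy⟩ := (pvLcsuf_pos_iff a b (ni + k - 1) (nj + k - 1)).1 (by omega)
          apply hchar (ni + k - 1) (by omega) hain (by omega)
          have ex : a[ni + k - 1] = x := by
            rw [List.getElem?_eq_getElem hain] at hx
            injection hx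
          rw [ex]
          exact List.mem_of_getElem? hy
      rw [hnone]

-- ===== VERDICT (by name: the statement is the Claim_ definition above) =====
theorem lcsubstrDP_spec : Claim_equal_lcsubstrDP := by
  unfold Claim_equal_lcsubstrDP
  intro A B K _ hpre
  unfold Spec_lcsubstrDP
  rw [pvDef_A, pvDef_Alt]
  unfold Pre_lcsubstrDP at hpre
  exact pvMainList A.toList B.toList K hpre
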